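/- GENERATED by farm/mkstatement.py from design/units.tsv (unit `DGifOpen.COMPOSITION`) and the Specs of Gif/Spec/*.lean — do not edit.
   THE STATEMENT of the proof unit `DGifOpen.COMPOSITION`: the function `DGifOpen` (143 instructions) satisfies its contract,
   GIVEN THE STATEMENTS OF ITS 7 SEGMENTS (`Gif.Spec.DGifOpen.Seg<k> Lay μ u₀`: what the unit `DGifOpen.<k>` proves).
   No machine code is walked: `ReachVia.trans` along the segments (the exit assertion of a segment is the entry assertion of
   its successor), an induction on the loop measures. What the names mean: ProgX/Base/Spec/Basic.lean. The theorem to prove: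
   `theorem DGifOpen_COMPOSITION_ok : Gif.Spec.DGifOpen_COMPOSITION.Statement`. -/
import Gif.Code
import Gif.Dec.All
import Gif.Labels
import Gif.Spec.Desc
import Gif.Spec.Seg_DGifOpen
namespace Gif.Spec.DGifOpen_COMPOSITION
open X86 X86.User Asan

/-- The statement of unit `DGifOpen.COMPOSITION`. -/
def Statement : Prop :=
  ∀ (Lay : Layout) (_hLay : Lay.hi = 0x1000000) (μ : Microarch) (_hμ : UserX.MicroOK μ) (u₀ : State)
    (_h_DGifOpen_P : Gif.Spec.DGifOpen.SegP Lay μ u₀)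
    (_h_DGifOpen_1 : Gif.Spec.DGifOpen.Seg1 Lay μ u₀)
    (_h_DGifOpen_2 : Gif.Spec.DGifOpen.Seg2 Lay μ u₀)
    (_h_DGifOpen_3 : Gif.Spec.DGifOpen.Seg3 Lay μ u₀)
    (_h_DGifOpen_4 : Gif.Spec.DGifOpen.Seg4 Lay μ u₀)
    (_h_DGifOpen_5 : Gif.Spec.DGifOpen.Seg5 Lay μ u₀)
    (_h_DGifOpen_E : Gif.Spec.DGifOpen.SegE Lay μ u₀),
    ∀ (H : Heap) (rest : List Obj) (frames : List (Nat × FrameLayout)) (R : Rd), Calls Lay μ ProgX.Base.WayInv (ProgX.Base.conv u₀) Gif.L.DGifOpen.entry (Gif.Spec.DGifOpen.spec H rest frames R)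

end Gif.Spec.DGifOpen_COMPOSITION
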